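-- pv_equiv track=rewrite | github.com/Naboni/Competitive-Programming | D_Binary_Inversions.py | solve
-- ===== SOURCE A (Python) =====
-- def solve(li):
--     zc, oc = 0, 0
--     ans = 0
--     for i in li:
--         if i == 0:
--             zc += 1
--             ans += oc
--         else:
--             oc += 1
--     return ans
-- ===== SOURCE B (Python) =====
-- def solve(li):
--     # Two-pass: build a prefix array of cumulative non-zero counts, then sum
--     # the prefix count at every zero element.
--     pref = []
--     c = 0
--     for x in li:
--         if x != 0:
--             c += 1
--         pref.append(c)
--     return sum(p for x, p in zip(li, pref) if x == 0)
-- ===== Notes on version B (the rewrite author's own statement) =====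
-- stated objective: alternative
-- what changed: Replaces the single-pass three-accumulator loop by a two-pass prefix-count array: first accumulate cumulative non-zero counts, then sum the prefix value at each zero element.
import Mathlib
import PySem

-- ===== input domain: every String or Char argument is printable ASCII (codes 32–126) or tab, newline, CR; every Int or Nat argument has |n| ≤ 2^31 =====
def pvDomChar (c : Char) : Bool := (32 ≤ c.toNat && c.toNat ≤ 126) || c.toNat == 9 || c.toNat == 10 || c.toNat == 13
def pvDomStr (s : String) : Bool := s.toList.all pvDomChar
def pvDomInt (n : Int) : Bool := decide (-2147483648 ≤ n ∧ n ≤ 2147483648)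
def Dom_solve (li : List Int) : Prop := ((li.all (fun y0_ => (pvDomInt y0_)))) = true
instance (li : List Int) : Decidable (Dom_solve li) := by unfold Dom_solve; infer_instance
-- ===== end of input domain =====

-- B replaces A's single-pass three-accumulator loop by a two-pass prefix-count
-- array summed at the zero positions (alternative decomposition, same cost).


-- ===== PORT A =====
def solve (li : List Int) : Int :=
  (li.foldl (fun (st : Int × Int × Int) i =>
      let zc := st.1; let oc := st.2.1; let ans := st.2.2
      if i = 0 then (zc + 1, oc, ans + oc) else (zc, oc + 1, ans))
    (0, 0, 0)).2.2

-- ===== PORT B =====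
-- prefix array of cumulative non-zero counts (c = running count so far)
def buildPref : List Int → Int → List Int
  | [], _ => []
  | x :: xs, c =>
      let c' := if x ≠ 0 then c + 1 else c
      c' :: buildPref xs c'

def solve_alt (li : List Int) : Int :=
  ((li.zip (buildPref li 0)).filter (fun xp => xp.1 == 0)).foldl
    (fun s xp => s + xp.2) 0

-- ===== PRECONDITION & SPEC =====
def Spec_solve (li : List Int) (out : Int) : Prop := out = solve_alt li
instance (li : List Int) (out : Int) : Decidable (Spec_solve li out) := by unfold Spec_solve; infer_instance

-- ===== CLAIM (what is proved, stated in full; the proofs are below) =====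
def Claim_equal_solve : Prop := ∀ (li : List Int), Dom_solve li → Spec_solve li (solve li)

-- ===== LEMMAS AND PROOFS =====

-- B's filtered fold with an arbitrary starting sum
theorem foldl_add_shift (l : List (Int × Int)) (a : Int) :
    l.foldl (fun s xp => s + xp.2) a = a + l.foldl (fun s xp => s + xp.2) 0 := by
  induction l generalizing a with
  | nil => simp
  | cons x xs ih =>
      simp only [List.foldl_cons]
      rw [ih (a + x.2), ih (0 + x.2)]
      ring

-- B's second pass as a function of the starting running count
def sumAt (li : List Int) (c : Int) : Int :=
  ((li.zip (buildPref li c)).filter (fun xp => xp.1 == 0)).foldl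
    (fun s xp => s + xp.2) 0

theorem sumAt_cons (x : Int) (xs : List Int) (c : Int) :
    sumAt (x :: xs) c =
      if x = 0 then c + sumAt xs c else sumAt xs (c + 1) := by
  by_cases hx : x = 0
  · simp only [sumAt, buildPref, hx]
    simp only [List.zip_cons_cons, List.filter_cons, if_neg (by simp : ¬(0 : Int) ≠ 0)]
    simp only [beq_self_eq_true, if_pos, List.foldl_cons]
    rw [foldl_add_shift]
    ring_nf
  · simp only [sumAt, buildPref, hx]
    simp only [List.zip_cons_cons, List.filter_cons, if_pos hx]
    have : (x == (0:Int)) = false := by simp [hx]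
    simp [this]

-- A's loop invariant: the answer accumulator plus what remains, with oc the
-- running non-zero count so far.
theorem solve_inv (li : List Int) (zc oc ans : Int) :
    (li.foldl (fun (st : Int × Int × Int) i =>
        let zc := st.1; let oc := st.2.1; let ans := st.2.2
        if i = 0 then (zc + 1, oc, ans + oc) else (zc, oc + 1, ans))
      (zc, oc, ans)).2.2 = ans + sumAt li oc := by
  induction li generalizing zc oc ans with
  | nil => simp [sumAt, buildPref]
  | cons x xs ih =>
      by_cases hx : x = 0 <;> (simp [hx, List.foldl_cons, ih, sumAt_cons]; try ring)

-- ===== VERDICT (by name: the statement is the Claim_ definition above) =====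
theorem solve_spec : Claim_equal_solve := by
  intro li _
  show solve li = solve_alt li
  have h := solve_inv li 0 0 0
  simpa [solve, solve_alt, sumAt] using h
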